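-- pv_equiv track=rewrite | github.com/satchelfrost/MulticolorCompareDNA | MultiDNAcolorMatch.py | parseSeq
-- ===== SOURCE A (Python) =====
-- def parseSeq(lines,seqName):
--
--     '''splits each column'''
--     data = []
--     for line in lines: data.append(line.split(' '))
--     '''removes any spaces'''
--     for i in range(len(data)):
--         for j in range(data[i].count('')): data[i].remove('')
--     '''deletes the numbers at beginning of column'''
--     for i in range(len(data)): del data[i][0]
--     '''creates a list of lists from dna sequence'''
--     seqRows = []
--     for i in range(len(data)):
--         seqRow = []
--         seqRow.append(seqName)
--         for j in range(len(data[i])):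
--             for k in range(len(data[i][j])):
--                 seqRow.append(data[i][j][k])
--         seqRows.append(seqRow)
--     return seqRows
-- ===== SOURCE B (Python) =====
-- def parseSeq(lines, seqName):
--     '''per line: scan an index past the leading spaces and the first token
--     (the leading number), then keep the remaining non-space characters'''
--     seqRows = []
--     for line in lines:
--         i = 0
--         while line[i] == ' ':       # a line is expected to start with a number token;
--             i += 1                  # IndexError if the line has no token at all
--         while i < len(line) and line[i] != ' ':
--             i += 1
--         seqRows.append([seqName] + [c for c in line[i:] if c != ' '])
--     return seqRows
-- ===== Notes on version B (the rewrite author's own statement) =====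
-- stated objective: simpler
-- what changed: B replaces A's four staged list sweeps (split each line into a token list, scrub empty tokens with repeated remove(), delete each row's leading token, then flatten tokens into characters) with a per-line index scan: two while loops move an index past the leading spaces and the first token, and the row is the seqName plus the non-space characters of the remaining suffix - no token lists are ever built.
import Mathlib
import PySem

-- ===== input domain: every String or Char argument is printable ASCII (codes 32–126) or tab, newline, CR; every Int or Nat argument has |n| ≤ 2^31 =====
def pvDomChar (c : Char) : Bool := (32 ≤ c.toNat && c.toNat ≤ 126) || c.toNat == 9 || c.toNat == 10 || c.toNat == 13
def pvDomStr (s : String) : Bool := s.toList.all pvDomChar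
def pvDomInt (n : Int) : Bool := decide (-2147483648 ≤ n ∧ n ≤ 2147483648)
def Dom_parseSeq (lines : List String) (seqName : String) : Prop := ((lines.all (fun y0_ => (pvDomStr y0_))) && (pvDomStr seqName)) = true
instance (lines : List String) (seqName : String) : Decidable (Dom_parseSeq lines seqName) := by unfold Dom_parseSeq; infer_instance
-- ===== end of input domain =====

-- B replaces A's four staged sweeps (split / scrub empties / del first / flatten) by an
-- index scan per line that skips the leading spaces and the first token, then keeps the
-- remaining non-space characters; no token lists are built (objective: simpler; return value only).

-- ===== PORT A =====
-- 'for j in range(data[i].count('')): data[i].remove('')' — one row's inner removal loop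
def pvRemoveEmpties (row : List String) : List String :=
  (List.range (PySem.List.count row "")).foldl
    (fun r _ => (PySem.List.remove? r "").getD r) row

def parseSeq (lines : List String) (seqName : String) : List (List String) :=
  -- data = []; for line in lines: data.append(line.split(' '))
  let data := lines.foldl (fun d line => d ++ [(PySem.Str.split? line " ").getD []]) []
  -- for i in range(len(data)): for j in range(data[i].count('')): data[i].remove('')
  let data := data.map pvRemoveEmpties
  -- for i in range(len(data)): del data[i][0]   (IndexError on an empty row — excluded by Pre_)
  let data := data.map (fun row => row.drop 1)
  -- seqRows loop: seqRow = [seqName]; nested index loops append each character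
  data.foldl
    (fun seqRows row =>
      seqRows ++ [row.foldl
        (fun seqRow tok => tok.toList.foldl (fun r c => r ++ [String.ofList [c]]) seqRow)
        [seqName]])
    []

-- ===== PORT B =====
-- 'while line[i] == " ": i += 1' — B's first scan loop as suffix recursion
-- (the [] case is Python's IndexError, excluded by Pre_)
def pvSkipSp : List Char → List Char
  | [] => []
  | c :: cs => if c = ' ' then pvSkipSp cs else c :: cs

-- 'while i < len(line) and line[i] != " ": i += 1' — B's second scan loop
def pvSkipTok : List Char → List Char
  | [] => []
  | c :: cs => if c ≠ ' ' then pvSkipTok cs else c :: cs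

def parseSeq_alt (lines : List String) (seqName : String) : List (List String) :=
  lines.foldl
    (fun seqRows line =>
      -- the suffix line[i:] after both scan loops
      let rest := pvSkipTok (pvSkipSp line.toList)
      -- [seqName] + [c for c in line[i:] if c != ' ']
      seqRows ++ [[seqName] ++ (rest.filter (fun c => c ≠ ' ')).map (fun c => String.ofList [c])])
    []

-- ===== PRECONDITION & SPEC =====
-- A raises IndexError (del data[i][0] on an empty token list) exactly on lines made only of spaces
-- (or empty); Pre_ admits every input on which A returns.
def Pre_parseSeq (lines : List String) (seqName : String) : Prop :=
  ∀ s ∈ lines, s.toList.any (fun c => c ≠ ' ') = true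
instance (lines : List String) (seqName : String) : Decidable (Pre_parseSeq lines seqName) := by unfold Pre_parseSeq; infer_instance
def pvWitness_parseSeq : List String × String := (["1 AC GT", "22  T"], "nm")

def Spec_parseSeq (lines : List String) (seqName : String) (out : List (List String)) : Prop := out = parseSeq_alt lines seqName
instance (lines : List String) (seqName : String) (out : List (List String)) : Decidable (Spec_parseSeq lines seqName out) := by unfold Spec_parseSeq; infer_instance

-- ===== CLAIM (what is proved, stated in full; the proofs are below) =====
def Claim_equal_parseSeq : Prop := ∀ (lines : List String) (seqName : String), Dom_parseSeq lines seqName → Pre_parseSeq lines seqName → Spec_parseSeq lines seqName (parseSeq lines seqName)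

-- ===== LEMMAS AND PROOFS =====

-- fuel-free model of PySem.Chars.splitOn on the single-char separator ' '
def pvSp : List Char → List (List Char)
  | [] => [[]]
  | c :: cs => if c = ' ' then [] :: pvSp cs else
      match pvSp cs with
      | [] => [[c]]
      | w :: ws => (c :: w) :: ws

def pvConsPre (p : List Char) : List (List Char) → List (List Char)
  | [] => [p]
  | w :: ws => (p ++ w) :: ws

theorem pvSp_ne_nil (cs : List Char) : pvSp cs ≠ [] := by
  cases cs with
  | nil => simp [pvSp]
  | cons c cs =>
    simp only [pvSp]
    split
    · simp
    · cases h : pvSp cs <;> simp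

theorem pv_splitOn_go (fuel : Nat) :
    ∀ (l cur : List Char) (acc : List (List Char)), l.length ≤ fuel →
      PySem.Chars.splitOn.go [' '] fuel l cur acc
        = acc.reverse ++ pvConsPre cur.reverse (pvSp l) := by
  induction fuel with
  | zero =>
    intro l cur acc h
    have : l = [] := List.length_eq_zero_iff.mp (Nat.le_zero.mp h)
    subst this
    simp [PySem.Chars.splitOn.go, pvSp, pvConsPre]
  | succ fuel ih =>
    intro l cur acc h
    cases l with
    | nil => simp [PySem.Chars.splitOn.go, pvSp, pvConsPre]
    | cons c rest =>
      by_cases hc : c = ' '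
      · subst hc
        have hpre : List.isPrefixOf [' '] (' ' :: rest) = true := by
          simp [List.isPrefixOf]
        rw [show PySem.Chars.splitOn.go [' '] (fuel + 1) (' ' :: rest) cur acc
              = PySem.Chars.splitOn.go [' '] fuel (List.drop 1 (' ' :: rest)) [] (cur.reverse :: acc)
            from by simp [PySem.Chars.splitOn.go, hpre]]
        rw [ih _ _ _ (by simpa using Nat.le_of_succ_le_succ h)]
        have hne := pvSp_ne_nil rest
        cases hsp : pvSp rest with
        | nil => exact absurd hsp hne
        | cons w ws =>
          simp [pvSp, hsp, pvConsPre]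
      · have hpre : List.isPrefixOf [' '] (c :: rest) = false := by
          simp [List.isPrefixOf]
          intro hh; exact hc hh.symm
        rw [show PySem.Chars.splitOn.go [' '] (fuel + 1) (c :: rest) cur acc
              = PySem.Chars.splitOn.go [' '] fuel rest (c :: cur) acc
            from by simp [PySem.Chars.splitOn.go, hpre]]
        rw [ih _ _ _ (by simpa using Nat.le_of_succ_le_succ h)]
        have hne := pvSp_ne_nil rest
        cases hsp : pvSp rest with
        | nil => exact absurd hsp hne
        | cons w ws =>
          simp [pvSp, hc, hsp, pvConsPre]

theorem pv_splitOn_eq_sp (cs : List Char) :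
    PySem.Chars.splitOn cs [' '] = pvSp cs := by
  rw [PySem.Chars.splitOn, pv_splitOn_go (cs.length + 1) cs [] [] (by omega)]
  have hne := pvSp_ne_nil cs
  cases hsp : pvSp cs with
  | nil => exact absurd hsp hne
  | cons w ws => simp [pvConsPre]

-- flatten of all nonempty words is the line without its spaces
theorem pv_sp_flatten (cs : List Char) :
    ((pvSp cs).filter (fun w => w ≠ [])).flatten = cs.filter (fun c => c ≠ ' ') := by
  induction cs with
  | nil => simp [pvSp]
  | cons c cs ih =>
    by_cases hc : c = ' '
    · subst hc; simpa [pvSp] using ih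
    · simp only [pvSp, if_neg hc]
      cases hsp : pvSp cs with
      | nil => exact absurd hsp (pvSp_ne_nil cs)
      | cons w ws =>
        rw [hsp] at ih
        by_cases hw : w = []
        · subst hw
          simpa [hc, List.filter] using by simpa [List.filter] using ih
        · simp only [List.filter, hc, hw] at ih ⊢
          simp only [decide_not] at ih ⊢
          simp [hc, hw, List.flatten] at ih ⊢
          simp [ih]

-- flatten of the nonempty words after the current one (mid-word state)
theorem pv_sp_tail (cs : List Char) :
    (((pvSp cs).tail).filter (fun w => w ≠ [])).flatten
      = (cs.dropWhile (fun c => c ≠ ' ')).filter (fun c => c ≠ ' ') := by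
  induction cs with
  | nil => simp [pvSp]
  | cons c cs ih =>
    by_cases hc : c = ' '
    · subst hc
      rw [show pvSp (' ' :: cs) = [] :: pvSp cs from by simp [pvSp], List.tail_cons, pv_sp_flatten]
      simp [List.dropWhile]
    · simp only [pvSp, if_neg hc]
      cases hsp : pvSp cs with
      | nil => exact absurd hsp (pvSp_ne_nil cs)
      | cons w ws =>
        rw [hsp] at ih
        simp only [List.tail_cons] at ih ⊢
        rw [ih]
        simp [List.dropWhile, hc]

-- flatten of the nonempty words after the FIRST one (A's per-line payload)
theorem pv_sp_drop1 (cs : List Char) :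
    (((pvSp cs).filter (fun w => w ≠ [])).drop 1).flatten
      = ((cs.dropWhile (fun c => c = ' ')).dropWhile (fun c => c ≠ ' ')).filter (fun c => c ≠ ' ') := by
  induction cs with
  | nil => simp [pvSp]
  | cons c cs ih =>
    by_cases hc : c = ' '
    · subst hc
      simp only [pvSp, if_pos rfl, if_true]
      rw [show (([] : List Char) :: pvSp cs).filter (fun w => w ≠ []) = (pvSp cs).filter (fun w => w ≠ []) from by simp [List.filter]]
      rw [ih]
      simp [List.dropWhile]
    · simp only [pvSp, if_neg hc]
      cases hsp : pvSp cs with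
      | nil => exact absurd hsp (pvSp_ne_nil cs)
      | cons w ws =>
        have h1 : ((c :: w) :: ws).filter (fun w => w ≠ []) = (c :: w) :: ws.filter (fun w => w ≠ []) := by
          simp [List.filter]
        rw [h1, List.drop_one, List.tail_cons]
        have h2 := pv_sp_tail cs
        rw [hsp, List.tail_cons] at h2
        rw [h2]
        simp [List.dropWhile, hc]

-- ===== A-side normalisation (reused from the staged sweeps) =====

theorem pv_filter_erase_self (e : String) (row : List String) :
    (row.erase e).filter (fun t => t ≠ e) = row.filter (fun t => t ≠ e) := by
  induction row with
  | nil => rfl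
  | cons x xs ih =>
    by_cases hx : x = e
    · subst hx; simp [List.erase_cons_head]
    · simpa [List.erase_cons, hx] using ih

theorem pv_remove_iter (e : String) (n : Nat) :
    ∀ (row : List String), PySem.List.count row e = n →
      (List.range n).foldl (fun r _ => (PySem.List.remove? r e).getD r) row
        = row.filter (fun t => t ≠ e) := by
  induction n with
  | zero =>
    intro row h
    have he : e ∉ row := List.count_eq_zero.mp (by simpa [PySem.List.count] using h)
    have hf : row.filter (fun t => t ≠ e) = row :=
      List.filter_eq_self.mpr (fun x hx => by
        have hne : x ≠ e := fun hh => he (hh ▸ hx)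
        simp [hne])
    simpa using hf.symm
  | succ n ih =>
    intro row h
    have hmem : e ∈ row := by
      by_contra hne
      simp [PySem.List.count, List.count_eq_zero.mpr hne] at h
    have hstep : (PySem.List.remove? row e).getD row = row.erase e := by
      rw [PySem.List.remove?_eq_some_erase row e hmem]; rfl
    have hcount : PySem.List.count (row.erase e) e = n := by
      simp only [PySem.List.count] at h ⊢
      rw [List.count_erase_self]
      omega
    rw [List.range_succ_eq_map, List.foldl_cons, List.foldl_map, hstep,
        ih (row.erase e) hcount, pv_filter_erase_self]

theorem pvRemoveEmpties_eq_filter (row : List String) :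
    pvRemoveEmpties row = row.filter (fun t => t ≠ "") :=
  pv_remove_iter "" (PySem.List.count row "") row rfl

-- extending a row char by char is appending the mapped chars
theorem pv_extend_chars (cs : List Char) (init : List String) :
    cs.foldl (fun r c => r ++ [String.ofList [c]]) init
      = init ++ cs.map (fun c => String.ofList [c]) := by
  induction cs generalizing init with
  | nil => simp
  | cons c cs ih => simp [ih]

theorem pv_rowA (toks : List String) (init : List String) :
    toks.foldl (fun seqRow tok => tok.toList.foldl (fun r c => r ++ [String.ofList [c]]) seqRow) init
      = init ++ (toks.flatMap (fun t => t.toList)).map (fun c => String.ofList [c]) := by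
  induction toks generalizing init with
  | nil => simp
  | cons t ts ih =>
    rw [List.foldl_cons, pv_extend_chars, ih]
    simp [List.flatMap_cons]

theorem pv_flatten_singletons {α β : Type} (f : α → β) (l : List α) :
    (l.map (fun x => [f x])).flatten = l.map f := by
  induction l with
  | nil => rfl
  | cons x xs ih => simp [ih]

theorem pvSkipSp_eq (cs : List Char) : pvSkipSp cs = cs.dropWhile (fun c => c = ' ') := by
  induction cs with
  | nil => rfl
  | cons c cs ih => by_cases hc : c = ' ' <;> simp [pvSkipSp, List.dropWhile, hc, ih]

theorem pvSkipTok_eq (cs : List Char) : pvSkipTok cs = cs.dropWhile (fun c => c ≠ ' ') := by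
  induction cs with
  | nil => rfl
  | cons c cs ih => by_cases hc : c = ' ' <;> simp [pvSkipTok, List.dropWhile, hc, ih]

-- the per-line equality of the two ports' row computations
theorem pv_line_eq (line : String) (seqName : String) :
    ((pvRemoveEmpties ((PySem.Str.split? line " ").getD [])).drop 1).foldl
        (fun seqRow tok => tok.toList.foldl (fun r c => r ++ [String.ofList [c]]) seqRow)
        [seqName]
      = [seqName] ++ (((pvSkipTok (pvSkipSp line.toList)).filter (fun c => c ≠ ' ')).map (fun c => String.ofList [c])) := by
  rw [pvRemoveEmpties_eq_filter, pv_rowA, pvSkipSp_eq, pvSkipTok_eq]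
  congr 1
  have hsplit : (PySem.Str.split? line " ").getD []
      = (pvSp line.toList).map String.ofList := by
    have hch : PySem.Chars.split? line.toList [' '] = some (pvSp line.toList) := by
      simp [PySem.Chars.split?, pv_splitOn_eq_sp]
    simp [PySem.Str.split?, hch]
  rw [hsplit]
  have hfil : ((pvSp line.toList).map String.ofList).filter (fun t => t ≠ "")
      = ((pvSp line.toList).filter (fun w => w ≠ [])).map String.ofList := by
    rw [List.filter_map]
    congr 1
    apply List.filter_congr
    intro w _
    have hw : (String.ofList w = "") ↔ w = [] := by
      constructor
      · intro h; have := congrArg String.toList h; simpa using this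
      · intro h; simp [h]
    simp [hw]
  rw [hfil, ← List.map_drop]
  have hflat : ((((pvSp line.toList).filter (fun w => w ≠ [])).drop 1).map String.ofList).flatMap (fun t => t.toList)
      = (((pvSp line.toList).filter (fun w => w ≠ [])).drop 1).flatten := by
    rw [List.flatMap_map]
    have h0 : ∀ t : List Char, (String.ofList t).toList = t := fun t => by simp
    simp [h0]
  rw [hflat, pv_sp_drop1]

-- ===== VERDICT =====
theorem parseSeq_spec : Claim_equal_parseSeq := by
  intro lines seqName _ _
  unfold Spec_parseSeq parseSeq parseSeq_alt
  simp only [PySem.List.foldl_append_singleton_eq_map, List.map_map, List.nil_append]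
  refine List.map_congr_left (fun line _ => ?_)
  simpa [Function.comp, pv_flatten_singletons] using pv_line_eq line seqName
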